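-- pv_equiv track=rewrite | github.com/Gyusik-Choi/algorithm | programmers/옹알이 (2)/옹알이 (2).py | solution
-- ===== SOURCE A (Python) =====
-- def solution(babbling):
--     cnt = 0
--     pronounce_list = ["aya", "ye", "woo", "ma"]
--
--     for babble in babbling:
--         is_possible = False
--         prev = ''
--         cur = ''
--
--         for i, b in enumerate(babble):
--             cur += b
--
--             if cur not in pronounce_list:
--                 continue
--
--             # 직전 비교와 동일
--             # 발음 X
--             if prev == cur:
--                 is_possible = False
--                 break
--
--             # 마지막 인덱스
--             # 발음 O
--             if i == len(babble) - 1: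
--                 is_possible = True
--                 break
--
--             # 아직 끝까지 검사 안한 상태
--             # bab 까지는 발음 O
--             # 직전 비교 발음 값을 bab 로 갱신
--             # bab 을 초기화 시켜서 나머지 babble 요소 검사할 수 있도록 한다
--             prev = cur
--             cur = ''
--
--         if is_possible:
--             cnt += 1
--
--     return cnt
-- ===== SOURCE B (Python) =====
-- def solution(babbling):
--     tokens = ("aya", "ye", "woo", "ma")
--
--     def ok(s, prev):
--         if not s:
--             return True
--         t = next((t for t in tokens if t != prev and s.startswith(t)), None)
--         return t is not None and ok(s[len(t):], t)
--
--     return sum(1 for b in babbling if b and ok(b, ''))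
-- ===== Notes on version B (the rewrite author's own statement) =====
-- stated objective: idiomatic
-- what changed: Replaces A's char-by-char accumulator loop with enumerate/index bookkeeping by a recursive token-prefix segmentation (strip one allowed pronunciation off the front at a time, remembering the previous one), counted with a generator expression.
import Mathlib
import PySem

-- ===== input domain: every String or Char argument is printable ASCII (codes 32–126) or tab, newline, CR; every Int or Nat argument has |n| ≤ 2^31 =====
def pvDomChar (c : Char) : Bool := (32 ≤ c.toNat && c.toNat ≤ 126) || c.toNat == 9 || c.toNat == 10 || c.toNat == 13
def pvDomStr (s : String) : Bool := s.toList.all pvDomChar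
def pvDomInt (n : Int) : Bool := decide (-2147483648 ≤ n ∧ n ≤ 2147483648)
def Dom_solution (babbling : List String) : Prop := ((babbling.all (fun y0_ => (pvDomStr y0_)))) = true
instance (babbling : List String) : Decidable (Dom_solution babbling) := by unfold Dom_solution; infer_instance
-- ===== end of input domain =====

-- B replaces A's char-by-char accumulator scan with a recursive token-prefix segmentation; same
-- return value, no speed claim.

-- ===== PORT A =====
-- A's pronounce_list
def pronounceList : List (List Char) := [['a','y','a'], ['y','e'], ['w','o','o'], ['m','a']]

-- A's inner `for i, b in enumerate(babble)` loop with `prev`/`cur` state and early `break`s,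
-- as structural recursion on the remaining characters (`rest = []` ⟺ `i == len(babble) - 1`;
-- falling off the end of the loop leaves `is_possible = False`).
def aLoop (prev cur : List Char) : List Char → Bool
  | [] => false
  | b :: rest =>
    if cur ++ [b] ∉ pronounceList then aLoop prev (cur ++ [b]) rest
    else if cur ++ [b] = prev then false
    else if rest = [] then true
    else aLoop (cur ++ [b]) [] rest

def solution (babbling : List String) : Int :=
  babbling.foldl (fun cnt babble => if aLoop [] [] babble.toList then cnt + 1 else cnt) 0

-- ===== PORT B =====
-- Source B's tokens tuple
def tokensB : List (List Char) := [['a','y','a'], ['y','e'], ['w','o','o'], ['m','a']]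

-- Source B's `ok(s, prev)`: `s.startswith(t)` is `t.isPrefixOf s`, `s[len(t):]` with the
-- nonnegative in-range start `len(t)` is `List.drop t.length s` (both exact here).
def okB (s : List Char) (prev : List Char) : Bool :=
  if s = [] then true
  else
    match h : tokensB.find? (fun t => decide (t ≠ prev) && t.isPrefixOf s) with
    | none => false
    | some t => okB (s.drop t.length) t
termination_by s.length
decreasing_by
  have hmem := List.mem_of_find?_eq_some h
  have hpred := List.find?_some h
  have hpre : t <+: s := by
    have h2 := hpred
    simp only [Bool.and_eq_true, decide_eq_true_eq, List.isPrefixOf_iff_prefix] at h2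
    exact h2.2
  have ht2 : 1 ≤ t.length := by
    fin_cases hmem <;> simp
  have hsne : s ≠ [] := by assumption
  have := hpre.length_le
  simp only [List.length_drop]
  omega

-- Source B's `sum(1 for b in babbling if b and ok(b, ''))`
def solution_alt (babbling : List String) : Int :=
  (babbling.countP (fun b => !(b == "") && okB b.toList []) : Nat)

-- ===== PRECONDITION & SPEC =====
def Spec_solution (babbling : List String) (out : Int) : Prop := out = solution_alt babbling
instance (babbling : List String) (out : Int) : Decidable (Spec_solution babbling out) := by unfold Spec_solution; infer_instance

-- ===== CLAIM (what is proved, stated in full; the proofs are below) =====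
def Claim_equal_solution : Prop := ∀ (babbling : List String), Dom_solution babbling → Spec_solution babbling (solution babbling)

-- ===== LEMMAS AND PROOFS =====

-- the token set is prefix-free
lemma tok_prefix_free : ∀ t ∈ tokensB, ∀ t' ∈ tokensB, t' <+: t → t' = t := by decide

lemma tok_ne_nil : ∀ t ∈ tokensB, t ≠ [] := by decide

lemma tok_len2 : ∀ t ∈ tokensB, 2 ≤ t.length := by decide

lemma unique_prefix {s t t' : List Char} (ht : t ∈ tokensB) (ht' : t' ∈ tokensB)
    (h : t <+: s) (h' : t' <+: s) : t = t' := by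
  rcases List.prefix_or_prefix_of_prefix h h' with hc | hc
  · exact tok_prefix_free t' ht' t ht hc
  · exact (tok_prefix_free t ht t' ht' hc).symm

lemma lists_eq : pronounceList = tokensB := rfl

-- if no token extends `cur` within `cur ++ s`, A's scan falls off the end: False
lemma scan_none : ∀ (s cur prev : List Char),
    (∀ t ∈ tokensB, ¬ (cur ≠ t ∧ cur <+: t ∧ t <+: cur ++ s)) →
    aLoop prev cur s = false := by
  intro s
  induction s with
  | nil => intro cur prev _; rfl
  | cons b s' ih =>
    intro cur prev h
    have hnot : (cur ++ [b]) ∉ pronounceList := by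
      intro hm
      exact h (cur ++ [b]) hm ⟨by simp, ⟨[b], rfl⟩, ⟨s', by simp⟩⟩
    rw [aLoop, if_pos hnot]
    apply ih (cur ++ [b]) prev
    intro t ht hcon
    obtain ⟨h1, h2, h3⟩ := hcon
    apply h t ht
    refine ⟨?_, ?_, ?_⟩
    · intro he; subst he
      have := h2.length_le
      simp at this
    · exact (List.prefix_append cur [b]).trans h2
    · simpa [List.append_assoc] using h3

-- if token `t` extends `cur` within `cur ++ s`, A's scan reaches `t` and then behaves as stated
lemma scan_reach : ∀ (s cur prev r t : List Char), t ∈ tokensB → cur ≠ t → cur <+: t →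
    cur ++ s = t ++ r →
    aLoop prev cur s = (if t = prev then false else if r = [] then true else aLoop t [] r) := by
  intro s
  induction s with
  | nil =>
    intro cur prev r t ht hne hp he
    exfalso
    have h1 : t <+: cur := ⟨r, by simpa using he.symm⟩
    exact hne (hp.eq_of_length_le h1.length_le)
  | cons b s' ih =>
    intro cur prev r t ht hne hp he
    obtain ⟨u, hu⟩ := hp
    have hune : u ≠ [] := by intro h0; subst h0; simp at hu; exact hne hu
    obtain ⟨d, u', rfl⟩ := List.exists_cons_of_ne_nil hune
    have hbd : b = d ∧ s' = u' ++ r := by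
      have : cur ++ b :: s' = cur ++ d :: (u' ++ r) := by
        rw [he, ← hu]; simp
      have := List.append_cancel_left this
      simp at this; exact ⟨this.1, this.2⟩
    obtain ⟨rfl, hs'⟩ := hbd
    by_cases hu' : u' = []
    · -- cur ++ [b] = t : the token completes here
      subst hu'
      have hcur : cur ++ [b] = t := by simpa using hu
      have htok : (cur ++ [b]) ∈ pronounceList := by
        rw [hcur, lists_eq]; exact ht
      rw [aLoop, if_neg (not_not_intro htok), hcur]
      have hsr : s' = r := by simpa using hs'
      subst hsr
      by_cases hpv : t = prev
      · simp [hpv]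
      · rw [if_neg hpv]
    · -- cur ++ [b] is a strict prefix of t: not a token, keep scanning
      have hp' : cur ++ [b] <+: t := ⟨u', by rw [← hu]; simp⟩
      have hne' : cur ++ [b] ≠ t := by
        intro h0
        apply hu'
        have h1 : (cur ++ [b]) ++ u' = t := by rw [← hu]; simp
        rw [h0] at h1
        have h2 : t ++ u' = t ++ [] := by simpa using h1
        exact List.append_cancel_left h2
      have hnotok : (cur ++ [b]) ∉ pronounceList := by
        intro hm
        exact hne' (tok_prefix_free t ht _ (lists_eq ▸ hm) hp')
      rw [aLoop, if_pos hnotok]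
      exact ih (cur ++ [b]) prev r t ht hne' hp' (by rw [← he]; simp)

lemma find_eq_none {s prev : List Char}
    (h : ∀ t ∈ tokensB, ¬ (t ≠ prev ∧ t <+: s)) :
    tokensB.find? (fun t => decide (t ≠ prev) && t.isPrefixOf s) = none := by
  rw [List.find?_eq_none]
  intro t ht
  simp only [Bool.and_eq_true, decide_eq_true_eq, List.isPrefixOf_iff_prefix, not_and]
  intro h1 h2
  exact h t ht ⟨h1, h2⟩

lemma find_eq_some {s prev t : List Char} (ht : t ∈ tokensB) (hp : t <+: s) (hne : t ≠ prev) :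
    tokensB.find? (fun t => decide (t ≠ prev) && t.isPrefixOf s) = some t := by
  have hpt : t.isPrefixOf s = true := List.isPrefixOf_iff_prefix.2 hp
  have hother : ∀ t' ∈ tokensB, t' ≠ t → t'.isPrefixOf s = false := by
    intro t' ht' hne'
    rw [Bool.eq_false_iff]
    rw [ne_eq, List.isPrefixOf_iff_prefix]
    intro hp'
    exact hne' (unique_prefix ht' ht hp' hp)
  fin_cases ht
  · show List.find? _ tokensB = _
    rw [show tokensB = [['a','y','a'], ['y','e'], ['w','o','o'], ['m','a']] from rfl]
    rw [List.find?_cons_of_pos (by simp [hpt, hne])]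
  · show List.find? _ tokensB = _
    rw [show tokensB = [['a','y','a'], ['y','e'], ['w','o','o'], ['m','a']] from rfl]
    rw [List.find?_cons_of_neg (by simp [hother ['a','y','a'] (by decide) (by decide)]),
        List.find?_cons_of_pos (by simp [hpt, hne])]
  · show List.find? _ tokensB = _
    rw [show tokensB = [['a','y','a'], ['y','e'], ['w','o','o'], ['m','a']] from rfl]
    rw [List.find?_cons_of_neg (by simp [hother ['a','y','a'] (by decide) (by decide)]),
        List.find?_cons_of_neg (by simp [hother ['y','e'] (by decide) (by decide)]),
        List.find?_cons_of_pos (by simp [hpt, hne])]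
  · show List.find? _ tokensB = _
    rw [show tokensB = [['a','y','a'], ['y','e'], ['w','o','o'], ['m','a']] from rfl]
    rw [List.find?_cons_of_neg (by simp [hother ['a','y','a'] (by decide) (by decide)]),
        List.find?_cons_of_neg (by simp [hother ['y','e'] (by decide) (by decide)]),
        List.find?_cons_of_neg (by simp [hother ['w','o','o'] (by decide) (by decide)]),
        List.find?_cons_of_pos (by simp [hpt, hne])]

lemma okB_nil (prev : List Char) : okB [] prev = true := by rw [okB]; simp

-- main equivalence on a single nonempty babble
lemma main_lemma : ∀ (n : ℕ) (s prev : List Char), s.length ≤ n → s ≠ [] →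
    aLoop prev [] s = okB s prev := by
  intro n
  induction n with
  | zero => intro s prev hl hs; cases s with
    | nil => exact absurd rfl hs
    | cons a l => simp at hl
  | succ n ih =>
    intro s prev hl hs
    by_cases hex : ∃ t ∈ tokensB, t <+: s
    · obtain ⟨t, ht, hp⟩ := hex
      obtain ⟨r, rfl⟩ := hp
      have hA := scan_reach (t ++ r) [] prev r t ht (Ne.symm (tok_ne_nil t ht)) List.nil_prefix (by simp)
      
      rw [hA]
      by_cases hpv : t = prev
      · -- A: False; B: find? none since only t is a prefix and t = prev
        rw [if_pos hpv, okB]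
        rw [if_neg hs]
        rw [find_eq_none (by
          intro t' ht' hcon
          obtain ⟨h1, h2⟩ := hcon
          exact h1 (hpv ▸ unique_prefix ht' ht h2 ⟨r, rfl⟩))]
      · rw [if_neg hpv, okB, if_neg hs, find_eq_some ht ⟨r, rfl⟩ hpv]
        show (if r = [] then true else aLoop t [] r) = okB (List.drop t.length (t ++ r)) t
        rw [List.drop_left]
        by_cases hr : r = []
        · subst hr; simp [okB_nil]
        · rw [if_neg hr]
          apply ih r t _ hr
          have := tok_len2 t ht
          have : (t ++ r).length = t.length + r.length := by simp
          omega
    · rw [not_exists] at hex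
      simp only [not_and] at hex
      rw [scan_none s [] prev (by
        intro t ht hcon
        exact hex t ht (by simpa using hcon.2.2))]
      rw [okB, if_neg hs, find_eq_none (by
        intro t ht hcon
        exact hex t ht hcon.2)]

lemma aLoop_eq (l : List Char) : aLoop [] [] l = (decide (l ≠ []) && okB l []) := by
  cases hl : l with
  | nil => rfl
  | cons a l' =>
    rw [main_lemma (a :: l').length (a :: l') [] le_rfl (by simp)]
    simp

lemma foldl_count (p : String → Bool) : ∀ (l : List String) (acc : Int),
    l.foldl (fun c b => if p b then c + 1 else c) acc = acc + (l.countP p : Nat) := by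
  intro l
  induction l with
  | nil => intro acc; simp
  | cons b l' ih =>
    intro acc
    rw [List.foldl_cons, List.countP_cons]
    by_cases hb : p b
    · rw [if_pos hb, ih]
      simp [hb]
      ring
    · rw [if_neg hb, ih]
      simp [hb]

lemma toList_ne_nil (b : String) : decide (b.toList ≠ []) = !(b == "") := by
  by_cases hb : b = "" <;> simp [hb]

-- ===== VERDICT (by name: the statement is the Claim_ definition above) =====
theorem solution_spec : Claim_equal_solution := by
  intro babbling _
  unfold Spec_solution solution solution_alt
  have hpt : ∀ b : String, aLoop [] [] b.toList = (!(b == "") && okB b.toList []) := by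
    intro b
    rw [aLoop_eq, toList_ne_nil]
  rw [show (fun (cnt : Int) babble => if aLoop [] [] babble.toList then cnt + 1 else cnt)
        = (fun (cnt : Int) babble => if (!(babble == "") && okB babble.toList []) then cnt + 1 else cnt) from by
      funext c b; rw [hpt]]
  rw [foldl_count (fun b => !(b == "") && okB b.toList []) babbling 0]
  simp
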